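-- pv_equiv track=rewrite | github.com/sotech117/basic-ultrasonic-linklayer | Sender.py | receive_string
-- ===== SOURCE A (Python) =====
-- def receive_string(data, start_freq=18000, freq_step=250):
--     binary = ['0'] * 8
--
--     for item in data:
--         freqPosition = (item - start_freq) // freq_step
--         if 0 <= freqPosition < 8: binary[freqPosition] = '1'
--
--     binary_string = ''.join(binary)
--     try:
--         return chr(int(binary_string, 2))
--     except ValueError:
--         return "Error: Invalid binary data"
-- ===== SOURCE B (Python) =====
-- def receive_string(data, start_freq=18000, freq_step=250):
--     code = 0
--     for p in range(8):
--         code = 2 * code + (1 if any((item - start_freq) // freq_step == p for item in data) else 0)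
--     return chr(code)
-- ===== Notes on version B (the rewrite author's own statement) =====
-- stated objective: alternative
-- what changed: Inverts the loop nesting: B iterates over the 8 bit positions and scans data with any() for each position, accumulating the character code Horner-style, instead of A's single pass over data filling a char array that is then joined and re-parsed with int(_,2).
import Mathlib
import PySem

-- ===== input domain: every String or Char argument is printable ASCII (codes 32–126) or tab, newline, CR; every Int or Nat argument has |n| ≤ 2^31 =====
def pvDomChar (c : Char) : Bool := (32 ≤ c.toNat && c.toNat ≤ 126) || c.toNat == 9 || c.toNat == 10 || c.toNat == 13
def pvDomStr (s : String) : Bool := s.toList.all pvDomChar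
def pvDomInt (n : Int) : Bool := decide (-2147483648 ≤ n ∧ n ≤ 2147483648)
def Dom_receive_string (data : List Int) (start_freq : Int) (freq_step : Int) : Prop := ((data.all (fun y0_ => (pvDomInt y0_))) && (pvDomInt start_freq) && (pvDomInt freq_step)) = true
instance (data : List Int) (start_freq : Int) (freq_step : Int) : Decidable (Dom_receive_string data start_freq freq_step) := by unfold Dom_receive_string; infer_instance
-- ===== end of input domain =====

-- B inverts the loop nesting: it iterates over the 8 bit positions, testing each with an
-- any()-scan of data, and builds the character code Horner-style, dropping A's char array,
-- join and int(_,2) re-parse; alternative decomposition, no speed claim.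

-- ===== PORT A =====
-- loop body of A: freqPosition = (item - start_freq) // freq_step; set binary[freqPosition] = '1'
def rsStepA (start_freq freq_step : Int) (binary : List Char) (item : Int) : List Char :=
  let fp := PySem.Int.floordiv (item - start_freq) freq_step
  if 0 ≤ fp ∧ fp < 8 then binary.set fp.toNat '1' else binary

-- hand port of int(s, 2): none = ValueError (empty or non-binary digit), exact on '0'/'1' strings
def rsParse2? (cs : List Char) : Option Nat :=
  if (!cs.isEmpty) && cs.all (fun c => c == '0' || c == '1') then
    some (cs.foldl (fun a c => 2 * a + (if c = '1' then 1 else 0)) 0)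
  else none

def receive_string (data : List Int) (start_freq : Int) (freq_step : Int) : String :=
  let binary := data.foldl (rsStepA start_freq freq_step) (List.replicate 8 '0')
  match rsParse2? binary with
  | some n => String.ofList [Char.ofNat n]   -- chr(n)
  | none => "Error: Invalid binary data"

-- ===== PORT B =====
-- for p in range(8): code = 2*code + (1 if any((item-start_freq)//freq_step == p for item in data) else 0)
def receive_string_alt (data : List Int) (start_freq : Int) (freq_step : Int) : String :=
  let code := (PySem.List.pyRange 0 8 1).foldl
    (fun c p =>
      2 * c + (if data.any (fun item => PySem.Int.floordiv (item - start_freq) freq_step == p) then 1 else 0))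
    (0 : Nat)
  String.ofList [Char.ofNat code]   -- chr(code)

-- ===== PRECONDITION & SPEC =====
-- Python A (and B) raise ZeroDivisionError when freq_step = 0 and data is non-empty.
def Pre_receive_string (data : List Int) (start_freq : Int) (freq_step : Int) : Prop :=
  freq_step ≠ 0 ∨ data = []
instance (data : List Int) (start_freq : Int) (freq_step : Int) : Decidable (Pre_receive_string data start_freq freq_step) := by unfold Pre_receive_string; infer_instance

def pvWitness_receive_string : List Int × Int × Int := ([18000, 18250, 19750], 18000, 250)

def Spec_receive_string (data : List Int) (start_freq : Int) (freq_step : Int) (out : String) : Prop := out = receive_string_alt data start_freq freq_step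
instance (data : List Int) (start_freq : Int) (freq_step : Int) (out : String) : Decidable (Spec_receive_string data start_freq freq_step out) := by unfold Spec_receive_string; infer_instance

-- ===== CLAIM (what is proved, stated in full; the proofs are below) =====
def Claim_equal_receive_string : Prop := ∀ (data : List Int) (start_freq : Int) (freq_step : Int), Dom_receive_string data start_freq freq_step → Pre_receive_string data start_freq freq_step → Spec_receive_string data start_freq freq_step (receive_string data start_freq freq_step)

-- ===== LEMMAS AND PROOFS =====

-- "some sample in data lands on position i" — the condition B tests per position
def rsCond (data : List Int) (start_freq freq_step : Int) (i : Int) : Bool :=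
  data.any (fun item => PySem.Int.floordiv (item - start_freq) freq_step == i)

theorem rsFoldA_len (sf fs : Int) :
    ∀ (data : List Int) (l : List Char), (data.foldl (rsStepA sf fs) l).length = l.length := by
  intro data
  induction data with
  | nil => intro l; rfl
  | cons x xs ih =>
      intro l
      rw [List.foldl_cons, ih]
      simp only [rsStepA]
      split <;> simp

theorem rsFoldA_get? (sf fs : Int) :
    ∀ (data : List Int) (l : List Char), l.length = 8 → ∀ (i : Nat), i < 8 →
      (data.foldl (rsStepA sf fs) l)[i]? =
        if rsCond data sf fs (i : Int) then some '1' else l[i]? := by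
  intro data
  induction data with
  | nil => intro l _ i _; simp [rsCond]
  | cons x xs ih =>
      intro l hl i hi
      have hlen : (rsStepA sf fs l x).length = 8 := by
        simp only [rsStepA]; split <;> simp [hl]
      rw [List.foldl_cons, ih _ hlen i hi]
      have hcond : rsCond (x :: xs) sf fs (i : Int)
          = ((PySem.Int.floordiv (x - sf) fs == (i : Int)) || rsCond xs sf fs (i : Int)) := by
        simp [rsCond]
      rw [hcond]
      by_cases hxs : rsCond xs sf fs (i : Int) = true
      · simp [hxs]
      · simp only [hxs, Bool.or_false]
        unfold rsStepA
        set fp := PySem.Int.floordiv (x - sf) fs with hfp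
        by_cases hin : 0 ≤ fp ∧ fp < 8
        · simp only [if_pos hin]
          rw [List.getElem?_set]
          by_cases heq : fp = (i : Int)
          · have : fp.toNat = i := by omega
            simp [hl, hi, heq]
          · have h1 : (fp == (i : Int)) = false := by simp [heq]
            have h2 : fp.toNat ≠ i := by omega
            simp [h1, h2]
        · have h1 : (fp == (i : Int)) = false := by
            simp only [beq_eq_false_iff_ne, ne_eq]
            intro h; omega
          simp [hin, h1]

-- collapse A's resulting 8-list into a literal list of per-position bits
theorem rsBinary_eq (sf fs : Int) (data : List Int) :
    data.foldl (rsStepA sf fs) (List.replicate 8 '0') =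
      [0,1,2,3,4,5,6,7].map (fun k : Int =>
        if rsCond data sf fs k then '1' else '0') := by
  have hlen : (data.foldl (rsStepA sf fs) (List.replicate 8 '0')).length = 8 := by
    rw [rsFoldA_len]; rfl
  have hget := rsFoldA_get? sf fs data (List.replicate 8 '0') rfl
  apply List.ext_getElem?
  intro i
  match i with
  | 0 =>
      have := hget 0 (by norm_num)
      by_cases h : rsCond data sf fs 0 = true <;> simp_all
  | 1 =>
      have := hget 1 (by norm_num)
      by_cases h : rsCond data sf fs 1 = true <;> simp_all
  | 2 =>
      have := hget 2 (by norm_num)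
      by_cases h : rsCond data sf fs 2 = true <;> simp_all
  | 3 =>
      have := hget 3 (by norm_num)
      by_cases h : rsCond data sf fs 3 = true <;> simp_all
  | 4 =>
      have := hget 4 (by norm_num)
      by_cases h : rsCond data sf fs 4 = true <;> simp_all
  | 5 =>
      have := hget 5 (by norm_num)
      by_cases h : rsCond data sf fs 5 = true <;> simp_all
  | 6 =>
      have := hget 6 (by norm_num)
      by_cases h : rsCond data sf fs 6 = true <;> simp_all
  | 7 =>
      have := hget 7 (by norm_num)
      by_cases h : rsCond data sf fs 7 = true <;> simp_all
  | (n+8) =>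
      rw [List.getElem?_eq_none (by omega), List.getElem?_eq_none (by simp)]

-- the 8-bool core: A's parse-of-bit-chars equals B's Horner accumulation (256 cases)
theorem rsHorner (b0 b1 b2 b3 b4 b5 b6 b7 : Bool) :
    (match rsParse2? [if b0 then '1' else '0', if b1 then '1' else '0',
        if b2 then '1' else '0', if b3 then '1' else '0', if b4 then '1' else '0',
        if b5 then '1' else '0', if b6 then '1' else '0', if b7 then '1' else '0'] with
      | some n => String.ofList [Char.ofNat n]
      | none => "Error: Invalid binary data")
    = String.ofList [Char.ofNat
        (2 * (2 * (2 * (2 * (2 * (2 * (2 * (2 * 0 +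
          (if b0 then 1 else 0)) + (if b1 then 1 else 0)) + (if b2 then 1 else 0)) +
          (if b3 then 1 else 0)) + (if b4 then 1 else 0)) + (if b5 then 1 else 0)) +
          (if b6 then 1 else 0)) + (if b7 then 1 else 0))] := by
  revert b0 b1 b2 b3 b4 b5 b6 b7; decide

-- ===== VERDICT (by name: the statement is the Claim_ definition above) =====
theorem receive_string_spec : Claim_equal_receive_string := by
  intro data sf fs _ _
  unfold Spec_receive_string receive_string receive_string_alt
  rw [rsBinary_eq]
  have hrange : PySem.List.pyRange 0 8 1 = [0,1,2,3,4,5,6,7] := by decide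
  rw [hrange]
  simp only [rsCond, List.map_cons, List.map_nil, List.foldl_cons, List.foldl_nil]
  exact rsHorner _ _ _ _ _ _ _ _
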